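-- pv_equiv track=rewrite | github.com/josh-hernandez-exe/dice-distro | dice_distro.py | simple_clean_params
-- ===== SOURCE A (Python) =====
-- BRACKET_CHARS = ["[", "]"]
--
-- def intersperse(lst, item):
--     result = [item] * (len(lst) * 2 - 1)
--     result[0::2] = lst
--     return result
--
-- def simple_clean_params(param_list):
--     """
--     This function expects the parameter list
--     It will split up the brackets so that each bracket is it's own entry
--     as well as remove any extra white space
--     """
--     temp_list = list(param_list)
--     for bracket in BRACKET_CHARS:
--         _temp_list = []
--         for item1 in temp_list:
--             if bracket in item1:
--                 item2 = item1.split(bracket)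
--                 _temp_list.extend(
--                     item3
--                     for item3 in intersperse(item2, bracket) if item3
--                 )
--             elif item1:
--                 _temp_list.append(item1)
--
--         temp_list = _temp_list
--
--     return temp_list
-- ===== SOURCE B (Python) =====
-- def simple_clean_params(param_list):
--     """Single per-string character scan: one pass per string with a token buffer,
--     instead of two sequential list-wide split/intersperse passes."""
--     result = []
--     for s in param_list:
--         buf = []
--         for ch in s:
--             if ch == '[' or ch == ']':
--                 if buf:
--                     result.append(''.join(buf))
--                     buf = []
--                 result.append(ch)
--             else:
--                 buf.append(ch)
--         if buf:
--             result.append(''.join(buf))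
--     return result
-- ===== Notes on version B (the rewrite author's own statement) =====
-- stated objective: simpler
-- what changed: Replaces A's two sequential list-wide passes (split each item on one bracket, re-intersperse the bracket, filter empties, once per bracket char) with a single per-string character scan that maintains a current-token buffer and emits brackets as their own tokens.
import Mathlib
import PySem

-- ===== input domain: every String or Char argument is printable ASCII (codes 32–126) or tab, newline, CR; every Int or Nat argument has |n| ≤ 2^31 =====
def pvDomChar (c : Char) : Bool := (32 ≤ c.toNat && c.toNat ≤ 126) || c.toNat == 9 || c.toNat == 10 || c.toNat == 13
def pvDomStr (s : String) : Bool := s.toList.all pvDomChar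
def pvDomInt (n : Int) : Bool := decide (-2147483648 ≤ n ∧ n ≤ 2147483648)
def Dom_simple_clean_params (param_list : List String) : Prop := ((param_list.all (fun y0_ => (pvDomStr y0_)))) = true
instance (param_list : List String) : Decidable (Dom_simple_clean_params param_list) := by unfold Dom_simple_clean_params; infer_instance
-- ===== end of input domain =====

-- B replaces A's two sequential list-wide split/intersperse passes (one per bracket) by a
-- single per-string character scan with a token buffer; same return value, different decomposition.

-- ===== PORT A =====
-- Python helper intersperse: result = [item]*(len(lst)*2-1); result[0::2] = lst.
-- Ported by hand (PySem has no primitive for stride-slice assignment): the assignment puts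
-- lst at the even positions and leaves item at the odd ones; exact, including lst = []
-- (Python then assigns a 0-element list into an empty extended slice).
def pvIntersperse (lst : List (List Char)) (item : List Char) : List (List Char) :=
  match lst with
  | [] => []
  | x :: xs => x :: xs.flatMap (fun y => [item, y])

-- body of A's outer loop `for bracket in BRACKET_CHARS`, at the List Char level
def pvPassA (temp_list : List (List Char)) (bracket : Char) : List (List Char) :=
  temp_list.foldl (fun acc item1 =>
    if PySem.Chars.isIn [bracket] item1 then
      acc ++ (pvIntersperse (PySem.Chars.splitOn item1 [bracket]) [bracket]).filter
        (fun item3 => decide (item3 ≠ []))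
    else if item1 ≠ [] then acc ++ [item1]
    else acc) []

def simple_clean_params (param_list : List String) : List String :=
  ((['[', ']'] : List Char).foldl (fun temp_list bracket => pvPassA temp_list bracket)
    (param_list.map String.toList)).map String.ofList

-- ===== PORT B =====
-- one pass over a string's characters, with the running result `res` and token buffer `buf`
def pvScanB (res : List (List Char)) (buf : List Char) : List Char → List (List Char)
  | [] => if buf ≠ [] then res ++ [buf] else res
  | c :: cs =>
      if c = '[' ∨ c = ']' then
        pvScanB ((if buf ≠ [] then res ++ [buf] else res) ++ [[c]]) [] cs
      else pvScanB res (buf ++ [c]) cs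

def simple_clean_params_alt (param_list : List String) : List String :=
  (param_list.foldl (fun res s => pvScanB res [] s.toList) []).map String.ofList

-- ===== PRECONDITION & SPEC =====
def Spec_simple_clean_params (param_list : List String) (out : List String) : Prop := out = simple_clean_params_alt param_list
instance (param_list : List String) (out : List String) : Decidable (Spec_simple_clean_params param_list out) := by unfold Spec_simple_clean_params; infer_instance

-- ===== CLAIM (what is proved, stated in full; the proofs are below) =====
def Claim_equal_simple_clean_params : Prop := ∀ (param_list : List String), Dom_simple_clean_params param_list → Spec_simple_clean_params param_list (simple_clean_params param_list)

-- ===== LEMMAS AND PROOFS =====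

-- recursive form of Python's s.split(b) for a one-character separator
def consHd (c : Char) : List (List Char) → List (List Char)
  | [] => [[c]]
  | h :: t => (c :: h) :: t

def splitC (b : Char) : List Char → List (List Char)
  | [] => [[]]
  | c :: cs => if c = b then [] :: splitC b cs else consHd c (splitC b cs)

def prepFirst (buf : List Char) : List (List Char) → List (List Char)
  | [] => [buf]
  | h :: t => (buf ++ h) :: t

-- canonical token lists: single-bracket (T1) and two-bracket (TT)
def pre1 (b c : Char) : List (List Char) → List (List Char)
  | [] => [[c]]
  | t :: ts => if t = [b] then [c] :: t :: ts else (c :: t) :: ts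

def T1 (b : Char) : List Char → List (List Char)
  | [] => []
  | c :: cs => if c = b then [c] :: T1 b cs else pre1 b c (T1 b cs)

def preL1 (b : Char) (buf : List Char) : List (List Char) → List (List Char)
  | [] => [buf]
  | t :: ts => if t = [b] then buf :: t :: ts else (buf ++ t) :: ts

def preT (c : Char) : List (List Char) → List (List Char)
  | [] => [[c]]
  | t :: ts => if t = ['['] ∨ t = [']'] then [c] :: t :: ts else (c :: t) :: ts

def TT : List Char → List (List Char)
  | [] => []
  | c :: cs => if c = '[' ∨ c = ']' then [c] :: TT cs else preT c (TT cs)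

def preLT (buf : List Char) : List (List Char) → List (List Char)
  | [] => [buf]
  | t :: ts => if t = ['['] ∨ t = [']'] then buf :: t :: ts else (buf ++ t) :: ts

def tokA (b : Char) (s : List Char) : List (List Char) :=
  (pvIntersperse (splitC b s) [b]).filter (fun t => decide (t ≠ []))

theorem splitC_ne_nil (b : Char) (s : List Char) : splitC b s ≠ [] := by
  cases s with
  | nil => simp [splitC]
  | cons c cs =>
    simp only [splitC]
    split
    · simp
    · cases h : splitC b cs <;> simp [consHd]

theorem prepFirst_nil {ls : List (List Char)} (h : ls ≠ []) : prepFirst [] ls = ls := by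
  cases ls with
  | nil => exact absurd rfl h
  | cons x xs => simp [prepFirst]

theorem go0 (sep l cur : List Char) (accL : List (List Char)) :
    PySem.Chars.splitOn.go sep 0 l cur accL = ((cur.reverse ++ l) :: accL).reverse := by
  rw [PySem.Chars.splitOn.go]

theorem goNil (sep cur : List Char) (n : Nat) (accL : List (List Char)) :
    PySem.Chars.splitOn.go sep (n + 1) [] cur accL = (cur.reverse :: accL).reverse := by
  rw [PySem.Chars.splitOn.go]
  all_goals omega

theorem goCons (b c : Char) (n : Nat) (rest cur : List Char) (accL : List (List Char)) :
    PySem.Chars.splitOn.go [b] (n + 1) (c :: rest) cur accL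
      = if c = b then PySem.Chars.splitOn.go [b] n rest [] (cur.reverse :: accL)
        else PySem.Chars.splitOn.go [b] n rest (c :: cur) accL := by
  rw [PySem.Chars.splitOn.go]
  by_cases hc : c = b
  · subst hc
    simp [List.isPrefixOf]
  · have hbc : (b == c) = false := by
      simp only [beq_eq_false_iff_ne, ne_eq]
      exact fun h => hc h.symm
    simp [List.isPrefixOf, hbc, hc]

theorem go_single (b : Char) (fuel : Nat) :
    ∀ (l cur : List Char) (accL : List (List Char)), l.length ≤ fuel →
    PySem.Chars.splitOn.go [b] fuel l cur accL
      = accL.reverse ++ prepFirst cur.reverse (splitC b l) := by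
  induction fuel with
  | zero =>
    intro l cur accL h
    have hl : l = [] := by cases l <;> simp_all
    subst hl
    rw [go0]
    simp [splitC, prepFirst]
  | succ n ih =>
    intro l cur accL h
    cases l with
    | nil =>
      rw [goNil]
      simp [splitC, prepFirst]
    | cons c rest =>
      rw [goCons]
      have hlen : rest.length ≤ n := by simpa using Nat.le_of_succ_le_succ h
      by_cases hc : c = b
      · rw [if_pos hc]
        rw [ih rest [] (cur.reverse :: accL) hlen]
        simp only [List.reverse_nil]
        rw [prepFirst_nil (splitC_ne_nil b rest)]
        simp [splitC, hc, prepFirst]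
      · rw [if_neg hc]
        rw [ih rest (c :: cur) accL hlen]
        rcases hsp : splitC b rest with _ | ⟨h1, t1⟩
        · exact absurd hsp (splitC_ne_nil b rest)
        · simp [splitC, hc, hsp, consHd, prepFirst]

theorem splitOn_single (b : Char) (s : List Char) :
    PySem.Chars.splitOn s [b] = splitC b s := by
  unfold PySem.Chars.splitOn
  rw [go_single b (s.length + 1) s [] [] (by omega)]
  simp [prepFirst_nil (splitC_ne_nil b s)]

theorem isIn_single (b : Char) (s : List Char) :
    PySem.Chars.isIn [b] s = true ↔ b ∈ s := by
  rw [PySem.Chars.isIn_iff_infix]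
  constructor
  · intro h; exact List.singleton_sublist.mp h.sublist
  · intro h
    obtain ⟨l1, l2, rfl⟩ := List.mem_iff_append.mp h
    exact ⟨l1, l2, by simp⟩

theorem splitC_not_mem (b : Char) (s : List Char) (h : b ∉ s) : splitC b s = [s] := by
  induction s with
  | nil => simp [splitC]
  | cons c cs ih =>
    have hc : c ≠ b := fun he => h (by simp [he])
    have hcs : b ∉ cs := fun hm => h (List.mem_cons_of_mem _ hm)
    simp [splitC, hc, ih hcs, consHd]

theorem int_cons (x : List Char) (i : List Char) {ls : List (List Char)} (h : ls ≠ []) :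
    pvIntersperse (x :: ls) i = x :: i :: pvIntersperse ls i := by
  cases ls with
  | nil => exact absurd rfl h
  | cons y t => simp [pvIntersperse]

theorem preL1_step (b c : Char) (hc : c ≠ b) (buf : List Char) (ts : List (List Char)) :
    preL1 b (buf ++ [c]) ts
      = if buf = [] then pre1 b c ts else preL1 b buf (pre1 b c ts) := by
  have hcb : ([c] : List Char) ≠ [b] := by simp [hc]
  cases ts with
  | nil => by_cases hb : buf = [] <;> simp [preL1, pre1, hb, hcb]
  | cons t ts' =>
    by_cases ht : t = [b]
    · by_cases hb : buf = [] <;> simp [preL1, pre1, ht, hb, hcb]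
    · have hct : (c :: t) ≠ [b] := by
        intro he
        rw [show ([b] : List Char) = b :: [] from rfl] at he
        exact hc (List.cons_eq_cons.mp he).1
      by_cases hb : buf = [] <;> simp [preL1, pre1, ht, hb, hct]

theorem A1 (b : Char) (s : List Char) :
    ∀ buf : List Char,
    (pvIntersperse (prepFirst buf (splitC b s)) [b]).filter (fun t => decide (t ≠ []))
      = if buf = [] then T1 b s else preL1 b buf (T1 b s) := by
  induction s with
  | nil =>
    intro buf
    by_cases h : buf = [] <;>
      simp [splitC, prepFirst, pvIntersperse, T1, preL1, h]
  | cons c cs ih =>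
    intro buf
    by_cases hc : c = b
    · have ihn := ih []
      rw [prepFirst_nil (splitC_ne_nil b cs), if_pos rfl] at ihn
      simp only [splitC, if_pos hc]
      rw [show prepFirst buf ([] :: splitC b cs) = (buf ++ []) :: splitC b cs from rfl]
      rw [int_cons _ _ (splitC_ne_nil b cs)]
      have hT : T1 b (c :: cs) = [c] :: T1 b cs := by simp [T1, hc]
      have ihn' : List.filter (fun t => !decide (t = [])) (pvIntersperse (splitC b cs) [b])
          = T1 b cs := by simpa using ihn
      by_cases hb : buf = [] <;>
        simp [hb, ihn', T1, hc, preL1]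
    · simp only [splitC, if_neg hc]
      rcases hsp : splitC b cs with _ | ⟨h1, t1⟩
      · exact absurd hsp (splitC_ne_nil b cs)
      · have key : prepFirst buf (consHd c (h1 :: t1)) = prepFirst (buf ++ [c]) (h1 :: t1) := by
          simp [consHd, prepFirst]
        rw [key, ← hsp, ih (buf ++ [c]), if_neg (by simp : ¬ (buf ++ [c] = []))]
        have hT : T1 b (c :: cs) = pre1 b c (T1 b cs) := by simp [T1, hc]
        rw [hT]
        exact preL1_step b c hc buf (T1 b cs)

theorem tokA_eq (b : Char) (s : List Char) : tokA b s = T1 b s := by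
  have h := A1 b s []
  rw [prepFirst_nil (splitC_ne_nil b s), if_pos rfl] at h
  exact h

theorem passA_eq (b : Char) (lst : List (List Char)) :
    ∀ acc : List (List Char),
    List.foldl (fun acc item1 =>
      if PySem.Chars.isIn [b] item1 then
        acc ++ (pvIntersperse (PySem.Chars.splitOn item1 [b]) [b]).filter
          (fun item3 => decide (item3 ≠ []))
      else if item1 ≠ [] then acc ++ [item1]
      else acc) acc lst
      = acc ++ lst.flatMap (fun s => T1 b s) := by
  induction lst with
  | nil => intro acc; simp
  | cons x xs ih =>
    intro acc
    simp only [List.foldl_cons, List.flatMap_cons]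
    rw [ih]
    have hbody : (if PySem.Chars.isIn [b] x then
        acc ++ (pvIntersperse (PySem.Chars.splitOn x [b]) [b]).filter
          (fun item3 => decide (item3 ≠ []))
      else if x ≠ [] then acc ++ [x] else acc) = acc ++ T1 b x := by
      by_cases hin : b ∈ x
      · rw [if_pos ((isIn_single b x).mpr hin), splitOn_single, ← tokA_eq]
        rfl
      · rw [if_neg (fun h => hin ((isIn_single b x).mp h))]
        rw [← tokA_eq]
        unfold tokA
        rw [splitC_not_mem b x hin]
        by_cases hxe : x = [] <;> simp [pvIntersperse, hxe]
    rw [hbody, List.append_assoc]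

theorem scanB_acc (cs : List Char) :
    ∀ (res : List (List Char)) (buf : List Char),
    pvScanB res buf cs = res ++ pvScanB [] buf cs := by
  induction cs with
  | nil => intro res buf; by_cases h : buf = [] <;> simp [pvScanB, h]
  | cons c cs ih =>
    intro res buf
    by_cases hc : c = '[' ∨ c = ']'
    · simp only [pvScanB, if_pos hc]
      rw [ih, ih ((if buf ≠ [] then [] ++ [buf] else []) ++ [[c]])]
      by_cases h : buf = [] <;> simp [h]
    · simp only [pvScanB, if_neg hc]
      exact ih res (buf ++ [c])

theorem preLT_step (c : Char) (hc : ¬ (c = '[' ∨ c = ']')) (buf : List Char)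
    (ts : List (List Char)) :
    preLT (buf ++ [c]) ts
      = if buf = [] then preT c ts else preLT buf (preT c ts) := by
  rcases not_or.mp hc with ⟨hc1, hc2⟩
  cases ts with
  | nil => by_cases hb : buf = [] <;> simp [preLT, preT, hb, hc1, hc2]
  | cons t ts' =>
    by_cases ht : t = ['['] ∨ t = [']']
    · by_cases hb : buf = [] <;> simp [preLT, preT, ht, hb, hc1, hc2]
    · by_cases hb : buf = [] <;> simp [preLT, preT, ht, hb, hc1, hc2]

theorem scanB_eq (cs : List Char) :
    ∀ buf : List Char,
    pvScanB [] buf cs = if buf = [] then TT cs else preLT buf (TT cs) := by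
  induction cs with
  | nil => intro buf; by_cases h : buf = [] <;> simp [pvScanB, TT, preLT, h]
  | cons c cs ih =>
    intro buf
    by_cases hc : c = '[' ∨ c = ']'
    · simp only [pvScanB, if_pos hc]
      rw [scanB_acc, ih [], if_pos rfl]
      have hT : TT (c :: cs) = [c] :: TT cs := by simp [TT, hc]
      rw [hT]
      rcases hc with h | h <;> subst h <;> by_cases hb : buf = [] <;> simp [preLT, hb]
    · simp only [pvScanB, if_neg hc]
      rw [ih (buf ++ [c]), if_neg (by simp : ¬ (buf ++ [c] = []))]
      have hT : TT (c :: cs) = preT c (TT cs) := by simp [TT, hc]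
      rw [hT]
      exact preLT_step c hc buf (TT cs)

theorem foldB (lst : List String) :
    ∀ res : List (List Char),
    List.foldl (fun r s => pvScanB r [] s.toList) res lst
      = res ++ lst.flatMap (fun s => TT s.toList) := by
  induction lst with
  | nil => intro res; simp
  | cons x xs ih =>
    intro res
    simp only [List.foldl_cons, List.flatMap_cons]
    rw [ih, scanB_acc, scanB_eq, if_pos rfl, List.append_assoc]

theorem T1_sub (b : Char) (s : List Char) :
    ∀ t ∈ T1 b s, t ≠ [] ∧ (t = [b] ∨ b ∉ t) ∧ (∀ x ∈ t, x = b ∨ x ∈ s) := by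
  induction s with
  | nil => simp [T1]
  | cons c cs ih =>
    intro t ht
    by_cases hc : c = b
    · rw [T1, if_pos hc] at ht
      rcases List.mem_cons.mp ht with h | h
      · subst h
        refine ⟨by simp, Or.inl (by rw [hc]), ?_⟩
        intro x hx
        rw [List.mem_singleton] at hx
        exact Or.inl (hx.trans hc)
      · obtain ⟨h1, h2, h3⟩ := ih t h
        exact ⟨h1, h2, fun x hx => (h3 x hx).imp id (List.mem_cons_of_mem c)⟩
    · rw [T1, if_neg hc] at ht
      cases hTT : T1 b cs with
      | nil =>
        rw [hTT] at ht
        simp only [pre1, List.mem_singleton] at ht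
        subst ht
        refine ⟨by simp, Or.inr ?_, ?_⟩
        · intro hm; rw [List.mem_singleton] at hm; exact hc hm.symm
        · intro x hx; rw [List.mem_singleton] at hx; exact Or.inr (by simp [hx])
      | cons u us =>
        rw [hTT] at ht
        have hmem_lift : ∀ t', t' ∈ u :: us →
            t' ≠ [] ∧ (t' = [b] ∨ b ∉ t') ∧ (∀ x ∈ t', x = b ∨ x ∈ c :: cs) := by
          intro t' ht'
          obtain ⟨h1, h2, h3⟩ := ih t' (by rw [hTT]; exact ht')
          exact ⟨h1, h2, fun x hx => (h3 x hx).imp id (List.mem_cons_of_mem c)⟩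
        by_cases hu : u = [b]
        · rw [pre1, if_pos hu] at ht
          rcases List.mem_cons.mp ht with h | h
          · subst h
            refine ⟨by simp, Or.inr ?_, ?_⟩
            · intro hm; rw [List.mem_singleton] at hm; exact hc hm.symm
            · intro x hx; rw [List.mem_singleton] at hx; exact Or.inr (by simp [hx])
          · exact hmem_lift t h
        · rw [pre1, if_neg hu] at ht
          rcases List.mem_cons.mp ht with h | h
          · subst h
            obtain ⟨h1, h2, h3⟩ := hmem_lift u ((by simp))
            refine ⟨by simp, Or.inr ?_, ?_⟩
            · intro hm
              rcases List.mem_cons.mp hm with h' | h'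
              · exact hc h'.symm
              · rcases h2 with h2 | h2
                · exact hu h2
                · exact h2 h'
            · intro x hx
              rcases List.mem_cons.mp hx with h' | h'
              · exact Or.inr (by simp [h'])
              · exact h3 x h'
          · exact hmem_lift t (List.mem_cons_of_mem u h)

theorem pre1_ne_nil (b c : Char) (ts : List (List Char)) : pre1 b c ts ≠ [] := by
  cases ts with
  | nil => simp [pre1]
  | cons t ts' => simp only [pre1]; split <;> simp

theorem T1_nonnil (b : Char) (s : List Char) (h : s ≠ []) : T1 b s ≠ [] := by
  cases s with
  | nil => exact absurd rfl h
  | cons c cs =>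
    simp only [T1]
    split
    · simp
    · exact pre1_ne_nil b c (T1 b cs)

theorem G_compose (s : List Char) :
    (T1 '[' s).flatMap (fun t => T1 ']' t) = TT s := by
  induction s with
  | nil => simp [T1, TT]
  | cons c cs ih =>
    by_cases h1 : c = '['
    · subst h1
      have hTT : TT ('[' :: cs) = ['['] :: TT cs := by simp [TT]
      simp [T1, pre1, hTT, ih]
    · by_cases h2 : c = ']'
      · subst h2
        have hT1 : T1 '[' (']' :: cs) = pre1 '[' ']' (T1 '[' cs) := by simp [T1, h1]
        have hTT : TT (']' :: cs) = [']'] :: TT cs := by simp [TT]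
        rw [hT1, hTT, ← ih]
        cases h : T1 '[' cs with
        | nil => simp [pre1, T1]
        | cons t ts =>
          by_cases ht : t = ['[']
          · simp only [pre1, ht]
            simp [T1, pre1]
          · simp only [pre1, if_neg ht]
            simp [T1]
      · have hT1 : T1 '[' (c :: cs) = pre1 '[' c (T1 '[' cs) := by simp [T1, h1]
        have hTT : TT (c :: cs) = preT c (TT cs) := by simp [TT, h1, h2]
        rw [hT1, hTT, ← ih]
        cases h : T1 '[' cs with
        | nil => simp [pre1, preT, T1, h2]
        | cons t ts =>
          by_cases ht : t = ['[']
          · simp only [pre1, ht]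
            simp [T1, pre1, preT, h2]
          · simp only [pre1, if_neg ht]
            have htmem : t ∈ T1 '[' cs := by rw [h]; simp
            have htne : t ≠ [] := (T1_sub '[' cs t htmem).1
            cases hu : T1 ']' t with
            | nil => exact absurd hu (T1_nonnil ']' t htne)
            | cons u us =>
              have hunb : u ≠ ['['] := by
                intro he
                have humem : u ∈ T1 ']' t := by rw [hu]; simp
                have hx := (T1_sub ']' t u humem).2.2 '[' (by rw [he]; simp)
                rcases hx with h' | h'
                · exact absurd h' (by decide)
                · rcases (T1_sub '[' cs t htmem).2.1 with h'' | h''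
                  · exact ht h''
                  · exact h'' h'
              have hstep : T1 ']' (c :: t) = pre1 ']' c (T1 ']' t) := by simp [T1, h2]
              simp only [List.flatMap_cons, hstep, hu]
              by_cases hub : u = [']']
              · simp [pre1, preT, hub]
              · simp [pre1, preT, hub, hunb]

theorem mapToList_flatMap (lst : List String) (g : List Char → List (List Char)) :
    (lst.map String.toList).flatMap g = lst.flatMap (fun s => g s.toList) := by
  induction lst with
  | nil => rfl
  | cons x xs ih => simp [ih]

theorem main_eq (param_list : List String) :
    simple_clean_params param_list = simple_clean_params_alt param_list := by
  unfold simple_clean_params simple_clean_params_alt pvPassA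
  simp only [List.foldl_cons, List.foldl_nil]
  rw [passA_eq, passA_eq]
  rw [foldB param_list []]
  simp only [List.nil_append, List.flatMap_assoc]
  simp only [G_compose]
  rw [mapToList_flatMap]

-- ===== VERDICT (by name: the statement is the Claim_ definition above) =====
theorem simple_clean_params_spec : Claim_equal_simple_clean_params := by
  intro param_list _
  unfold Spec_simple_clean_params
  exact main_eq param_list
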